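-- pv_equiv track=rewrite | github.com/sssdddwww2/CVPR2021_VSPW_Implement | dataset2.py | dilation_lists
-- ===== SOURCE A (Python) =====
-- def dilation_lists(list_,num):
--     newlists=[]
--     for a in range(num+1):
--         newlist=[]
--         for k in range(len(list_)):
--             if k%(num+1)==a:
--                 newlist.append(list_[k])
--         newlists.append(newlist)
--     return newlists
-- ===== SOURCE B (Python) =====
-- def dilation_lists(list_, num):
--     n = num + 1
--     buckets = [[] for _ in range(n)]
--     for i, x in enumerate(list_):
--         buckets[i % n].append(x)
--     return buckets
-- ===== Notes on version B (the rewrite author's own statement) =====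
-- stated objective: faster
-- what changed: Replaced the num+1 full scans of list_ (one per residue class) by a single enumerate pass that appends each element to bucket i % (num+1).
-- outside the precondition, e.g. on dilation_lists([1], -1): A returns [], B raises ZeroDivisionError; on dilation_lists([1], -3): A returns [], B raises IndexError
import Mathlib
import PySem

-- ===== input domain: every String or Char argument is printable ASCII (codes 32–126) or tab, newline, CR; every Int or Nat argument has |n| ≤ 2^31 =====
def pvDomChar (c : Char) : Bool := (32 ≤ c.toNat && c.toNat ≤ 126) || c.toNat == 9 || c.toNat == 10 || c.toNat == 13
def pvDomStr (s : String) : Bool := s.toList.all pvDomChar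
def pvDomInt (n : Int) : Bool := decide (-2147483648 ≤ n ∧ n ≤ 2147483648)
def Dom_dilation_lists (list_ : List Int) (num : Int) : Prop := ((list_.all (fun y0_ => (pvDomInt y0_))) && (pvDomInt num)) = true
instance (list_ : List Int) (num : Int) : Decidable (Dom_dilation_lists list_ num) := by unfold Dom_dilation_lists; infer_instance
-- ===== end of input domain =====

-- B replaces A's num+1 scans of list_ with one enumerate pass into num+1 buckets (asymptotically faster in a timing run).

-- ===== PORT A =====
def dilation_lists (list_ : List Int) (num : Int) : List (List Int) :=
  (PySem.List.pyRange 0 (num + 1)).foldl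
    (fun newlists a =>
      newlists ++
        [(PySem.List.pyRange 0 (PySem.List.len list_)).foldl
          (fun newlist k =>
            if PySem.Int.mod k (num + 1) = a then
              newlist ++ [PySem.List.pyGetD list_ k 0]   -- k ranges over valid indices, so list_[k] never raises
            else newlist)
          []])
    []

-- ===== PORT B =====
def dilation_lists_alt (list_ : List Int) (num : Int) : List (List Int) :=
  let n := num + 1
  let buckets := (PySem.List.pyRange 0 n).map (fun _ => ([] : List Int))
  (PySem.List.enumerate list_).foldl
    (fun bs p => bs.modify (PySem.Int.mod p.1 n).toNat (· ++ [p.2])) buckets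

-- ===== PRECONDITION & SPEC =====
-- Pre_ excludes negative num with nonempty list_: A returns [] there (its outer range is empty),
-- while B's bucket indexing raises (ZeroDivisionError for num = -1, IndexError below).
def Pre_dilation_lists (list_ : List Int) (num : Int) : Prop := 0 ≤ num ∨ list_ = []
instance (list_ : List Int) (num : Int) : Decidable (Pre_dilation_lists list_ num) := by unfold Pre_dilation_lists; infer_instance
def pvWitness_dilation_lists : List Int × Int := ([3, 1, 4, 1, 5], 1)

def Spec_dilation_lists (list_ : List Int) (num : Int) (out : List (List Int)) : Prop := out = dilation_lists_alt list_ num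
instance (list_ : List Int) (num : Int) (out : List (List Int)) : Decidable (Spec_dilation_lists list_ num out) := by unfold Spec_dilation_lists; infer_instance

-- ===== CLAIM (what is proved, stated in full; the proofs are below) =====
def Claim_equal_dilation_lists : Prop := ∀ (list_ : List Int) (num : Int), Dom_dilation_lists list_ num → Pre_dilation_lists list_ num → Spec_dilation_lists list_ num (dilation_lists list_ num)

-- ===== LEMMAS AND PROOFS =====

-- B's fold appends each enumerated element to its residue bucket.
lemma pv_foldB (n : Int) (xs : List Int) :
    ∀ (s : Int) (B0 : List (List Int)),
      (PySem.List.enumerate xs s).foldl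
          (fun bs p => bs.modify (PySem.Int.mod p.1 n).toNat (· ++ [p.2])) B0
        = B0.mapIdx (fun a b =>
            b ++ ((PySem.List.enumerate xs s).filter
                    (fun p => decide ((PySem.Int.mod p.1 n).toNat = a))).map (·.2)) := by
  induction xs with
  | nil =>
      intro s B0
      simp only [PySem.List.enumerate_nil, List.foldl_nil, List.filter_nil,
        List.map_nil, List.append_nil]
      exact (List.ext_getElem (by simp) (fun a h1 h2 => by simp [List.getElem_mapIdx])).symm
  | cons x xs ih =>
      intro s B0
      rw [PySem.List.enumerate_cons]
      simp only [List.foldl_cons]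
      rw [ih (s + 1)]
      apply List.ext_getElem
      · simp [List.length_modify]
      · intro a h1 h2
        simp only [List.getElem_mapIdx, List.getElem_modify, List.filter_cons]
        by_cases hia : (PySem.Int.mod s n).toNat = a
        · simp [hia]
        · simp [hia]

lemma pv_mapIdx_replicate_nil (m : Nat) (F : Nat → List Int) :
    (List.replicate m ([] : List Int)).mapIdx (fun a b => b ++ F a)
      = (List.range m).map F := by
  apply List.ext_getElem
  · simp
  · intro a h1 h2
    simp [List.getElem_mapIdx]

-- ===== VERDICT (by name: the statement is the Claim_ definition above) =====
theorem dilation_lists_spec : Claim_equal_dilation_lists := by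
  intro list_ num _ hpre
  unfold Spec_dilation_lists dilation_lists dilation_lists_alt
  rcases hpre with hnum | hnil
  · -- 0 ≤ num
    have hn : (0 : Int) < num + 1 := by omega
    rw [PySem.List.foldl_append_singleton_eq_map, List.nil_append,
        pv_foldB (num + 1) list_ 0]
    have hB0 : (PySem.List.pyRange 0 (num + 1)).map (fun _ => ([] : List Int))
        = List.replicate (num + 1).toNat ([] : List Int) := by
      rw [List.eq_replicate_iff]
      constructor
      · simp [PySem.List.length_pyRange_one]
      · simp
    rw [hB0, pv_mapIdx_replicate_nil]
    rw [PySem.List.pyRange_one 0 (num + 1)]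
    simp only [sub_zero, List.map_map]
    apply List.map_congr_left
    intro a ha
    simp only [Function.comp, zero_add]
    rw [PySem.List.foldl_append_ite, List.nil_append]
    rw [PySem.List.enumerate_eq_map_pyRange list_ 0, List.filter_map, List.map_map]
    apply congrArg (List.map _)  -- reduce to equality of the two filters
    apply List.filter_congr
    intro j hj
    have hj0 : 0 ≤ j := by
      rcases (PySem.List.mem_pyRange_one).1 hj with ⟨h1, _⟩
      exact h1
    have hmn : 0 ≤ PySem.Int.mod j (num + 1) := PySem.Int.mod_nonneg j hn
    simp only [Function.comp, decide_eq_decide]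
    omega
  · subst hnil
    simp [PySem.List.enumerate_nil, PySem.List.len,
          PySem.List.pyRange_one_eq_nil]
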